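-- pv_equiv track=rewrite | github.com/mshablovskyy/prg-basics | 07-Arrays/7.3.31.py | f
-- ===== SOURCE A (Python) =====
-- def f(arr, val = "max"):
--     min_v = arr[0][0]
--     min_pos = [0,0]
--     max_v = arr[0][0]
--     max_pos = [0,0]
--     for r in range(len(arr)):
--         for i in range(len(arr[r])):
--             if min_v > arr[r][i]:
--                 min_v = arr[r][i]
--                 min_pos = [r, i]
--             if max_v < arr[r][i]:
--                 max_v = arr[r][i]
--                 max_pos = [r, i]
--     if val == "max":
--         return max_pos
--     elif val == "min":
--         return min_pos
-- ===== SOURCE B (Python) =====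
-- def f(arr, val="max"):
--     flat = [x for row in arr for x in row]
--     if val == "max":
--         target = max(flat)
--     elif val == "min":
--         target = min(flat)
--     else:
--         return None
--     for r, row in enumerate(arr):
--         for i, x in enumerate(row):
--             if x == target:
--                 return [r, i]
-- ===== Notes on version B (the rewrite author's own statement) =====
-- stated objective: alternative
-- what changed: Instead of one pass maintaining running min/max values and positions simultaneously, B computes only the requested extremum value over the flattened array and then locates its first row-major occurrence in a second equality scan.
-- outside the precondition, e.g. on f([[1]], 'x'): A returns None, B returns None
import Mathlib
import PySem

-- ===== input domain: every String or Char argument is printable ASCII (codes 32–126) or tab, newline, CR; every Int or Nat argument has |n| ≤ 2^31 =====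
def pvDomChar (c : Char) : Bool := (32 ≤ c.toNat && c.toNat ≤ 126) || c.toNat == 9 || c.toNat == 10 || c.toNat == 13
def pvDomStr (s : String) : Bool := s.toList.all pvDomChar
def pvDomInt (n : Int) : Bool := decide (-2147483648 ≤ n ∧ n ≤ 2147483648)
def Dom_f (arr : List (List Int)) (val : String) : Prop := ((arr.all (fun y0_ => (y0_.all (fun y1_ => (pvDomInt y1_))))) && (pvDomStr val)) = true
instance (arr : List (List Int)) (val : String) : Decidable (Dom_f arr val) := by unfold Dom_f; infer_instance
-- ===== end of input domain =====

-- B replaces A's single-pass four-component running min/max state by two passes: compute only the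
-- requested extremum value over the flattened array, then find its first row-major position by equality search.


-- ===== PORT A =====
-- literal transliteration; arr[0][0] raises IndexError when arr or arr[0] is empty (excluded by Pre_f),
-- the pyGetD defaults are only reached there; the final 'else []' is Python's implicit 'return None' (excluded by Pre_f)
def f (arr : List (List Int)) (val : String) : List Int :=
  let a00 := PySem.List.pyGetD (PySem.List.pyGetD arr 0 []) 0 0
  let st :=
    (PySem.List.pyRange 0 (arr.length : Int) 1).foldl (fun st r =>
      let row := PySem.List.pyGetD arr r []
      (PySem.List.pyRange 0 (row.length : Int) 1).foldl (fun st i =>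
        let x := PySem.List.pyGetD row i 0
        let st1 := if st.1 > x then (x, ([r, i] : List Int), st.2.2.1, st.2.2.2) else st
        if st1.2.2.1 < x then (st1.1, st1.2.1, x, ([r, i] : List Int)) else st1) st)
      (a00, ([0, 0] : List Int), a00, ([0, 0] : List Int))
  if val == "max" then st.2.2.2
  else if val == "min" then st.2.1
  else []

-- ===== PORT B =====
-- findPos is Source B's second pass: first row-major position whose value equals the target; the
-- 'none => []' arm is Python's implicit 'return None' when the target is absent (never, under Pre_f)
def findPos (arr : List (List Int)) (t : Int) : List Int :=
  match (PySem.List.enumerate arr 0).findSome? (fun rr =>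
      ((PySem.List.enumerate rr.2 0).find? (fun ix => ix.2 == t)).map (fun ix => ([rr.1, ix.1] : List Int))) with
  | some p => p
  | none => []

-- 'none => []' below is where Python's max()/min() of an empty sequence raises ValueError (excluded by
-- Pre_f); the final 'else []' is Source B's 'return None' for an invalid val (excluded by Pre_f)
def f_alt (arr : List (List Int)) (val : String) : List Int :=
  let flat := arr.flatMap (fun row => row)
  if val == "max" then
    match PySem.List.max? flat (fun x => x) with
    | some t => findPos arr t
    | none => []
  else if val == "min" then
    match PySem.List.min? flat (fun x => x) with
    | some t => findPos arr t
    | none => []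
  else []

-- ===== PRECONDITION & SPEC =====
-- Pre_f excludes: empty arr or empty first row, where A raises IndexError on arr[0][0]; and val other
-- than "max"/"min", where A returns None, which is not a value of the declared list-of-int type.
def Pre_f (arr : List (List Int)) (val : String) : Prop :=
  arr ≠ [] ∧ arr.headI ≠ [] ∧ (val = "max" ∨ val = "min")
instance (arr : List (List Int)) (val : String) : Decidable (Pre_f arr val) := by unfold Pre_f; infer_instance
def pvWitness_f : List (List Int) × String := ([[1, 3], [2]], "max")

def Spec_f (arr : List (List Int)) (val : String) (out : List Int) : Prop := out = f_alt arr val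
instance (arr : List (List Int)) (val : String) (out : List Int) : Decidable (Spec_f arr val out) := by unfold Spec_f; infer_instance

-- ===== CLAIM (what is proved, stated in full; the proofs are below) =====
def Claim_equal_f : Prop := ∀ (arr : List (List Int)) (val : String), Dom_f arr val → Pre_f arr val → Spec_f arr val (f arr val)
-- ===== LEMMAS AND PROOFS =====
-- pairsOf arr: the row-major list of ([r,i], value) pairs both programs traverse;
-- updMin/updMax: A's two strict running updates; runM/runm: the running max/min value.

def pairsOf (arr : List (List Int)) : List (List Int × Int) :=
  (PySem.List.enumerate arr 0).flatMap (fun rr =>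
    (PySem.List.enumerate rr.2 0).map (fun ix => (([rr.1, ix.1] : List Int), ix.2)))

def updMin (st : Int × List Int) (e : List Int × Int) : Int × List Int :=
  if st.1 > e.2 then (e.2, e.1) else st

def updMax (st : Int × List Int) (e : List Int × Int) : Int × List Int :=
  if st.1 < e.2 then (e.2, e.1) else st

def runM (l : List (List Int × Int)) (v : Int) : Int := l.foldl (fun m e => max m e.2) v

def runm (l : List (List Int × Int)) (v : Int) : Int := l.foldl (fun m e => min m e.2) v

def step4 (st : Int × List Int × Int × List Int) (e : List Int × Int) : Int × List Int × Int × List Int :=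
  let st1 := if st.1 > e.2 then (e.2, e.1, st.2.2.1, st.2.2.2) else st
  if st1.2.2.1 < e.2 then (st1.1, st1.2.1, e.2, e.1) else st1

theorem runM_cons (e : List Int × Int) (t : List (List Int × Int)) (v : Int) :
    runM (e :: t) v = runM t (max v e.2) := rfl

theorem runm_cons (e : List Int × Int) (t : List (List Int × Int)) (v : Int) :
    runm (e :: t) v = runm t (min v e.2) := rfl

theorem runM_ge (l : List (List Int × Int)) (v : Int) : v ≤ runM l v :=
  (PySem.List.le_foldl_max_int l (fun e => e.2) v).1

theorem runm_le (l : List (List Int × Int)) (v : Int) : runm l v ≤ v := by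
  induction l generalizing v with
  | nil => exact le_refl v
  | cons e t ih => exact le_trans (ih (min v e.2)) (min_le_left _ _)

theorem fold_split (l : List (List Int × Int)) (a c : Int) (b d : List Int) :
    l.foldl (fun st e =>
        let st1 := if st.1 > e.2 then (e.2, e.1, st.2.2.1, st.2.2.2) else st
        if st1.2.2.1 < e.2 then (st1.1, st1.2.1, e.2, e.1) else st1) (a, b, c, d)
    = ((l.foldl updMin (a, b)).1, (l.foldl updMin (a, b)).2,
       (l.foldl updMax (c, d)).1, (l.foldl updMax (c, d)).2) := by
  induction l generalizing a b c d with
  | nil => rfl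
  | cons e t ih =>
    simp only [List.foldl_cons, updMin, updMax]
    split_ifs <;> simp_all

theorem fold_split' (l : List (List Int × Int)) (a c : Int) (b d : List Int) :
    l.foldl step4 (a, b, c, d)
    = ((l.foldl updMin (a, b)).1, (l.foldl updMin (a, b)).2,
       (l.foldl updMax (c, d)).1, (l.foldl updMax (c, d)).2) := fold_split l a c b d

theorem foldMax_spec (l : List (List Int × Int)) (v : Int) (p : List Int) :
    l.foldl updMax (v, p) = (runM l v,
      (((l.find? (fun e => decide (v < e.2) && decide (e.2 = runM l v))).map Prod.fst).getD p)) := by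
  induction l generalizing v p with
  | nil => simp [runM]
  | cons e t ih =>
    rw [List.foldl_cons, runM_cons]
    by_cases h : v < e.2
    · rw [max_eq_right h.le]
      have hupd : updMax (v, p) e = (e.2, e.1) := by simp [updMax, h]
      rw [hupd, ih]
      by_cases hM : e.2 = runM t e.2
      · have hfind : (e :: t).find? (fun e' => decide (v < e'.2) && decide (e'.2 = runM t e.2)) = some e := by
          rw [List.find?_cons_of_pos]; simp [h, ← hM]
        have hnone : t.find? (fun e' => decide (e.2 < e'.2) && decide (e'.2 = runM t e.2)) = none := by
          rw [List.find?_eq_none]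
          intro x hx
          simp only [Bool.and_eq_true, decide_eq_true_eq, not_and]
          intro hlt hxe; rw [hxe, ← hM] at hlt; exact lt_irrefl _ hlt
        rw [hfind, hnone]; simp
      · have hlt : e.2 < runM t e.2 := lt_of_le_of_ne (runM_ge t e.2) hM
        have hskip : (e :: t).find? (fun e' => decide (v < e'.2) && decide (e'.2 = runM t e.2))
            = t.find? (fun e' => decide (v < e'.2) && decide (e'.2 = runM t e.2)) := by
          rw [List.find?_cons_of_neg]; simp [hM]
        have hcongr : (fun e' : List Int × Int => decide (e.2 < e'.2) && decide (e'.2 = runM t e.2))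
            = (fun e' => decide (v < e'.2) && decide (e'.2 = runM t e.2)) := by
          funext e'
          by_cases he' : e'.2 = runM t e.2
          · simp [he', hlt, lt_trans h hlt]
          · simp [he']
        rw [hskip, hcongr]
        have hmem : ∃ e' ∈ t, e'.2 = runM t e.2 := by
          have := PySem.List.foldl_max_mem (t.map (fun e' => e'.2)) e.2
          rw [List.foldl_map] at this
          rcases this with h1 | h1
          · exact absurd h1.symm hM
          · rcases List.mem_map.1 h1 with ⟨e', he', hee⟩; exact ⟨e', he', hee⟩
        obtain ⟨e', he', hee⟩ := hmem
        have hsome : (t.find? (fun e' => decide (v < e'.2) && decide (e'.2 = runM t e.2))).isSome := by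
          rw [List.find?_isSome]
          exact ⟨e', he', by simp [hee, lt_trans h hlt]⟩
        obtain ⟨r, hr⟩ := Option.isSome_iff_exists.1 hsome
        rw [hr]; simp
    · have hupd : updMax (v, p) e = (v, p) := by simp [updMax, h]
      rw [max_eq_left (not_lt.1 h), hupd, ih]
      have hskip : (e :: t).find? (fun e' => decide (v < e'.2) && decide (e'.2 = runM t v))
          = t.find? (fun e' => decide (v < e'.2) && decide (e'.2 = runM t v)) := by
        rw [List.find?_cons_of_neg]; simp [h]
      rw [hskip]

theorem foldMin_spec (l : List (List Int × Int)) (v : Int) (p : List Int) :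
    l.foldl updMin (v, p) = (runm l v,
      (((l.find? (fun e => decide (e.2 < v) && decide (e.2 = runm l v))).map Prod.fst).getD p)) := by
  induction l generalizing v p with
  | nil => simp [runm]
  | cons e t ih =>
    rw [List.foldl_cons, runm_cons]
    by_cases h : e.2 < v
    · rw [min_eq_right h.le]
      have hupd : updMin (v, p) e = (e.2, e.1) := by simp [updMin, h]
      rw [hupd, ih]
      by_cases hM : e.2 = runm t e.2
      · have hfind : (e :: t).find? (fun e' => decide (e'.2 < v) && decide (e'.2 = runm t e.2)) = some e := by
          rw [List.find?_cons_of_pos]; simp [h, ← hM]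
        have hnone : t.find? (fun e' => decide (e'.2 < e.2) && decide (e'.2 = runm t e.2)) = none := by
          rw [List.find?_eq_none]
          intro x hx
          simp only [Bool.and_eq_true, decide_eq_true_eq, not_and]
          intro hlt hxe; rw [hxe, ← hM] at hlt; exact lt_irrefl _ hlt
        rw [hfind, hnone]; simp
      · have hlt : runm t e.2 < e.2 := lt_of_le_of_ne (runm_le t e.2) (fun hc => hM hc.symm)
        have hskip : (e :: t).find? (fun e' => decide (e'.2 < v) && decide (e'.2 = runm t e.2))
            = t.find? (fun e' => decide (e'.2 < v) && decide (e'.2 = runm t e.2)) := by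
          rw [List.find?_cons_of_neg]; simp [hM]
        have hcongr : (fun e' : List Int × Int => decide (e'.2 < e.2) && decide (e'.2 = runm t e.2))
            = (fun e' => decide (e'.2 < v) && decide (e'.2 = runm t e.2)) := by
          funext e'
          by_cases he' : e'.2 = runm t e.2
          · simp [he', hlt, lt_trans hlt h]
          · simp [he']
        rw [hskip, hcongr]
        have hmem : ∃ e' ∈ t, e'.2 = runm t e.2 := by
          have := PySem.List.foldl_min_mem (t.map (fun e' => e'.2)) e.2
          rw [List.foldl_map] at this
          rcases this with h1 | h1
          · exact absurd h1.symm hM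
          · rcases List.mem_map.1 h1 with ⟨e', he', hee⟩; exact ⟨e', he', hee⟩
        obtain ⟨e', he', hee⟩ := hmem
        have hsome : (t.find? (fun e' => decide (e'.2 < v) && decide (e'.2 = runm t e.2))).isSome := by
          rw [List.find?_isSome]
          exact ⟨e', he', by simp [hee, lt_trans hlt h]⟩
        obtain ⟨r, hr⟩ := Option.isSome_iff_exists.1 hsome
        rw [hr]; simp
    · have hupd : updMin (v, p) e = (v, p) := by simp [updMin, h]
      rw [min_eq_left (not_lt.1 h), hupd, ih]
      have hskip : (e :: t).find? (fun e' => decide (e'.2 < v) && decide (e'.2 = runm t v))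
          = t.find? (fun e' => decide (e'.2 < v) && decide (e'.2 = runm t v)) := by
        rw [List.find?_cons_of_neg]; simp [h]
      rw [hskip]

theorem map_snd_enum_flat (arr : List (List Int)) (s : Int) :
    ((PySem.List.enumerate arr s).flatMap (fun rr =>
      (PySem.List.enumerate rr.2 0).map (fun ix => (([rr.1, ix.1] : List Int), ix.2)))).map Prod.snd
    = arr.flatMap (fun row => row) := by
  induction arr generalizing s with
  | nil => simp [PySem.List.enumerate_nil]
  | cons r t ih =>
    rw [PySem.List.enumerate_cons]
    simp only [List.flatMap_cons, List.map_append, List.map_map, ih]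
    congr 1
    have hc : (Prod.snd ∘ fun ix : Int × Int => (([s, ix.1] : List Int), ix.2)) = fun ix : Int × Int => ix.2 := rfl
    rw [hc, PySem.List.map_snd_enumerate]

theorem map_snd_pairsOf (arr : List (List Int)) :
    (pairsOf arr).map Prod.snd = arr.flatMap (fun row => row) :=
  map_snd_enum_flat arr 0

theorem findPos_eq (arr : List (List Int)) (t : Int) :
    findPos arr t = (match (pairsOf arr).find? (fun e => e.2 == t) with
      | some e => e.1 | none => []) := by
  unfold findPos pairsOf
  rw [List.find?_flatMap]
  have hrow : ∀ rr : Int × List Int,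
      ((PySem.List.enumerate rr.2 0).map (fun ix => (([rr.1, ix.1] : List Int), ix.2))).find?
        (fun e => e.2 == t)
      = ((PySem.List.enumerate rr.2 0).find? (fun ix => ix.2 == t)).map
          (fun ix => (([rr.1, ix.1] : List Int), ix.2)) := by
    intro rr; rw [List.find?_map]; rfl
  simp only [hrow]
  have hmapf : Option.map Prod.fst ((PySem.List.enumerate arr 0).findSome? (fun rr =>
        ((PySem.List.enumerate rr.2 0).find? (fun ix => ix.2 == t)).map
          (fun ix => (([rr.1, ix.1] : List Int), ix.2))))
      = (PySem.List.enumerate arr 0).findSome? (fun rr =>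
        ((PySem.List.enumerate rr.2 0).find? (fun ix => ix.2 == t)).map
          (fun ix => ([rr.1, ix.1] : List Int))) := by
    rw [List.map_findSome?]
    congr 1
    funext rr
    simp only [Function.comp_apply, Option.map_map]
    rfl
  rw [← hmapf]
  cases (PySem.List.enumerate arr 0).findSome? (fun rr =>
        ((PySem.List.enumerate rr.2 0).find? (fun ix => ix.2 == t)).map
          (fun ix => (([rr.1, ix.1] : List Int), ix.2))) <;> simp

theorem f_as_fold (arr : List (List Int)) (val : String) :
    f arr val =
      (let a00 := PySem.List.pyGetD (PySem.List.pyGetD arr 0 []) 0 0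
       if val == "max" then ((pairsOf arr).foldl updMax (a00, [0, 0])).2
       else if val == "min" then ((pairsOf arr).foldl updMin (a00, [0, 0])).2
       else []) := by
  have key : ∀ init : Int × List Int × Int × List Int,
      (PySem.List.pyRange 0 (arr.length : Int) 1).foldl (fun st r =>
        let row := PySem.List.pyGetD arr r []
        (PySem.List.pyRange 0 (row.length : Int) 1).foldl (fun st i =>
          let x := PySem.List.pyGetD row i 0
          let st1 := if st.1 > x then (x, ([r, i] : List Int), st.2.2.1, st.2.2.2) else st
          if st1.2.2.1 < x then (st1.1, st1.2.1, x, ([r, i] : List Int)) else st1) st) init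
      = (pairsOf arr).foldl step4 init := by
    intro init
    rw [pairsOf, List.foldl_flatMap]
    rw [PySem.List.enumerate_eq_map_pyRange arr ([] : List Int), List.foldl_map]
    have hfun : (fun (st : Int × List Int × Int × List Int) (r : Int) =>
        let row := PySem.List.pyGetD arr r []
        (PySem.List.pyRange 0 (row.length : Int) 1).foldl (fun st i =>
          let x := PySem.List.pyGetD row i 0
          let st1 := if st.1 > x then (x, ([r, i] : List Int), st.2.2.1, st.2.2.2) else st
          if st1.2.2.1 < x then (st1.1, st1.2.1, x, ([r, i] : List Int)) else st1) st)
        = (fun st r =>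
            ((PySem.List.enumerate (PySem.List.pyGetD arr r ([] : List Int)) 0).map
              (fun ix => (([r, ix.1] : List Int), ix.2))).foldl step4 st) := by
      funext st r
      rw [PySem.List.enumerate_eq_map_pyRange (PySem.List.pyGetD arr r ([] : List Int)) (0 : Int),
        List.map_map, List.foldl_map]
      rfl
    rw [hfun]
    rfl
  unfold f
  simp only [key (_, _, _, _)]
  rw [fold_split']

theorem pairsOf_cons_cons (x : Int) (r0 : List Int) (rs : List (List Int)) :
    pairsOf ((x :: r0) :: rs) = ([0, 0], x) ::
      ((PySem.List.enumerate r0 1).map (fun ix => (([0, ix.1] : List Int), ix.2)) ++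
       (PySem.List.enumerate rs 1).flatMap (fun rr =>
         (PySem.List.enumerate rr.2 0).map (fun ix => (([rr.1, ix.1] : List Int), ix.2)))) := by
  simp [pairsOf, PySem.List.enumerate_cons]

theorem main_eq (arr : List (List Int)) (val : String)
    (hne : arr ≠ []) (hh : arr.headI ≠ []) (hval : val = "max" ∨ val = "min") :
    f arr val = f_alt arr val := by
  match arr, hne with
  | a :: rs, _ =>
  match a, hh with
  | x :: r0, _ =>
  rw [f_as_fold]
  have ha00 : PySem.List.pyGetD (PySem.List.pyGetD ((x :: r0) :: rs) 0 []) 0 0 = x := by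
    rw [PySem.List.pyGetD_zero_cons, PySem.List.pyGetD_zero_cons]
  rw [ha00]
  generalize hT : ((PySem.List.enumerate r0 1).map (fun ix => (([0, ix.1] : List Int), ix.2)) ++
       (PySem.List.enumerate rs 1).flatMap (fun rr =>
         (PySem.List.enumerate rr.2 0).map (fun ix => (([rr.1, ix.1] : List Int), ix.2)))) = T
  have hpairs : pairsOf ((x :: r0) :: rs) = ([0, 0], x) :: T := by
    rw [pairsOf_cons_cons, hT]
  have hflat : ((x :: r0) :: rs).flatMap (fun row => row) = x :: T.map Prod.snd := by
    rw [← map_snd_pairsOf, hpairs]; rfl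
  have hM : runM (pairsOf ((x :: r0) :: rs)) x = List.foldl max x (T.map Prod.snd) := by
    rw [hpairs, runM_cons, max_self, runM, ← List.foldl_map]
  have hm : runm (pairsOf ((x :: r0) :: rs)) x = List.foldl min x (T.map Prod.snd) := by
    rw [hpairs, runm_cons, min_self, runm, ← List.foldl_map]
  rcases hval with rfl | rfl
  · -- val = "max"
    unfold f_alt
    simp only [hflat, PySem.List.max?_id_cons, findPos_eq, ← hM]
    set M := runM (pairsOf ((x :: r0) :: rs)) x with hMdef
    rw [show (("max" : String) == "max") = true from rfl, if_pos rfl]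
    rw [foldMax_spec]
    by_cases hMx : M = x
    · have hnone : (pairsOf ((x :: r0) :: rs)).find?
          (fun e => decide (x < e.2) && decide (e.2 = M)) = none := by
        rw [List.find?_eq_none]
        intro e he
        simp only [Bool.and_eq_true, decide_eq_true_eq, not_and]
        intro hlt heq; rw [heq, hMx] at hlt; exact lt_irrefl _ hlt
      have hhead : (pairsOf ((x :: r0) :: rs)).find? (fun e => e.2 == M) = some ([0, 0], x) := by
        rw [hpairs, List.find?_cons_of_pos]
        simp [hMx]
      rw [hnone, hhead]; simp
    · have hxM : x < M := lt_of_le_of_ne (runM_ge _ x) (fun hc => hMx hc.symm)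
      have hcongr : (fun e : List Int × Int => decide (x < e.2) && decide (e.2 = M))
          = (fun e : List Int × Int => e.2 == M) := by
        funext e
        by_cases he : e.2 = M
        · simp [he, hxM]
        · simp [he]
      rw [hcongr]
      have hmem : ∃ e ∈ pairsOf ((x :: r0) :: rs), e.2 = M := by
        have h0 := PySem.List.foldl_max_mem ((pairsOf ((x :: r0) :: rs)).map (fun e => e.2)) x
        rw [List.foldl_map] at h0
        rcases h0 with h1 | h1
        · exact absurd h1 hMx
        · rcases List.mem_map.1 h1 with ⟨e, he, hee⟩; exact ⟨e, he, hee⟩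
      obtain ⟨e, he, hee⟩ := hmem
      have hsome : ((pairsOf ((x :: r0) :: rs)).find? (fun e : List Int × Int => e.2 == M)).isSome := by
        rw [List.find?_isSome]
        exact ⟨e, he, by simp [hee]⟩
      obtain ⟨r, hr⟩ := Option.isSome_iff_exists.1 hsome
      rw [hr]; simp
  · -- val = "min"
    unfold f_alt
    simp only [hflat, PySem.List.min?_id_cons, findPos_eq, ← hm]
    set M := runm (pairsOf ((x :: r0) :: rs)) x with hMdef
    rw [show (("min" : String) == "max") = false from rfl, if_neg (by simp),
      show (("min" : String) == "min") = true from rfl, if_pos rfl]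
    rw [foldMin_spec]
    by_cases hMx : M = x
    · have hnone : (pairsOf ((x :: r0) :: rs)).find?
          (fun e => decide (e.2 < x) && decide (e.2 = M)) = none := by
        rw [List.find?_eq_none]
        intro e he
        simp only [Bool.and_eq_true, decide_eq_true_eq, not_and]
        intro hlt heq; rw [heq, hMx] at hlt; exact lt_irrefl _ hlt
      have hhead : (pairsOf ((x :: r0) :: rs)).find? (fun e => e.2 == M) = some ([0, 0], x) := by
        rw [hpairs, List.find?_cons_of_pos]
        simp [hMx]
      rw [hnone, hhead]; simp
    · have hxM : M < x := lt_of_le_of_ne (runm_le _ x) hMx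
      have hcongr : (fun e : List Int × Int => decide (e.2 < x) && decide (e.2 = M))
          = (fun e : List Int × Int => e.2 == M) := by
        funext e
        by_cases he : e.2 = M
        · simp [he, hxM]
        · simp [he]
      rw [hcongr]
      have hmem : ∃ e ∈ pairsOf ((x :: r0) :: rs), e.2 = M := by
        have h0 := PySem.List.foldl_min_mem ((pairsOf ((x :: r0) :: rs)).map (fun e => e.2)) x
        rw [List.foldl_map] at h0
        rcases h0 with h1 | h1
        · exact absurd h1 hMx
        · rcases List.mem_map.1 h1 with ⟨e, he, hee⟩; exact ⟨e, he, hee⟩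
      obtain ⟨e, he, hee⟩ := hmem
      have hsome : ((pairsOf ((x :: r0) :: rs)).find? (fun e : List Int × Int => e.2 == M)).isSome := by
        rw [List.find?_isSome]
        exact ⟨e, he, by simp [hee]⟩
      obtain ⟨r, hr⟩ := Option.isSome_iff_exists.1 hsome
      rw [hr]; simp

-- ===== VERDICT (by name: the statement is the Claim_ definition above) =====
theorem f_spec : Claim_equal_f := by
  intro arr val _ hpre
  unfold Spec_f
  exact main_eq arr val hpre.1 hpre.2.1 hpre.2.2
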